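-- pv_equiv track=rewrite | github.com/slavishchenko/spoti2py | models/_tonality.py | assign_mode_to_the_key
-- ===== SOURCE A (Python) =====
-- def assign_mode_to_the_key(key: str, mode: int) -> str:
--     """Returns major or minor chord"""
--     if not isinstance(key, str):
--         raise TypeError("Key has to be a string")
--     if not isinstance(mode, int):
--         raise TypeError("Mode has to be an integer (0, 1)")
--     if not mode in range(0, 2):
--         raise Exception("Mode has to be either 0 or 1")
--
--     if mode == 0:
--         if not "/" in key:
--             return f"{key}m"
--         return "/".join([f"{k}m" for k in key.split("/")])
--     return key
-- ===== SOURCE B (Python) =====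
-- def assign_mode_to_the_key(key: str, mode: int) -> str:
--     """Returns major or minor chord"""
--     if not isinstance(key, str):
--         raise TypeError("Key has to be a string")
--     if not isinstance(mode, int):
--         raise TypeError("Mode has to be an integer (0, 1)")
--     if mode not in (0, 1):
--         raise Exception("Mode has to be either 0 or 1")
--
--     if mode == 0:
--         return key.replace("/", "m/") + "m"
--     return key
-- ===== Notes on version B (the rewrite author's own statement) =====
-- stated objective: simpler
-- what changed: For mode==0 the split/list-comprehension/join (plus the separate no-slash fast path) is replaced by a single pass: key.replace("/", "m/") + "m".
import Mathlib
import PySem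

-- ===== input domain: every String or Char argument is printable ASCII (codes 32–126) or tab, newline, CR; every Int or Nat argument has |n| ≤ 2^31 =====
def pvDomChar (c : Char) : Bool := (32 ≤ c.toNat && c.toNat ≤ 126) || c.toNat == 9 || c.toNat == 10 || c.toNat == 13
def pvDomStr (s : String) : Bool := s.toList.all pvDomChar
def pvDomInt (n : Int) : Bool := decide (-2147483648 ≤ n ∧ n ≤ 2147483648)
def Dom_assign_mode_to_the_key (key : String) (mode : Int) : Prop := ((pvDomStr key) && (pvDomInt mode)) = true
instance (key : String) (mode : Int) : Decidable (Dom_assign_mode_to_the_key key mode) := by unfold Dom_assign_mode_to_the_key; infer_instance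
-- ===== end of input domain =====

-- B replaces A's split/map/join (and its no-slash fast path) for mode 0 by one
-- str.replace("/", "m/") + "m"; same return value on every input where A returns.

-- ===== PORT A =====
def assign_mode_to_the_key (key : String) (mode : Int) : String :=
  -- the two isinstance checks always pass for (String, Int) arguments;
  -- `mode in range(0, 2)` raises unless mode ∈ {0, 1} — excluded by Pre_
  if mode = 0 then
    if ¬ (PySem.Str.isIn "/" key = true) then
      String.ofList (key.toList ++ "m".toList)           -- f"{key}m"
    else
      PySem.Str.join "/"
        (((PySem.Str.split? key "/").getD []).map
          (fun k => String.ofList (k.toList ++ "m".toList)))  -- "/".join([f"{k}m" …])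
  else key

-- ===== PORT B =====
def assign_mode_to_the_key_alt (key : String) (mode : Int) : String :=
  if mode = 0 then
    String.ofList ((PySem.Str.replace key "/" "m/").toList ++ "m".toList)  -- key.replace("/","m/") + "m"
  else key

-- ===== PRECONDITION & SPEC =====
-- Pre_ excludes exactly the inputs where A raises: mode outside {0, 1}.
def Pre_assign_mode_to_the_key (key : String) (mode : Int) : Prop := mode = 0 ∨ mode = 1
instance (key : String) (mode : Int) : Decidable (Pre_assign_mode_to_the_key key mode) := by
  unfold Pre_assign_mode_to_the_key; infer_instance
def pvWitness_assign_mode_to_the_key : String × Int := ("C#/Db", 0)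

def Spec_assign_mode_to_the_key (key : String) (mode : Int) (out : String) : Prop := out = assign_mode_to_the_key_alt key mode
instance (key : String) (mode : Int) (out : String) : Decidable (Spec_assign_mode_to_the_key key mode out) := by unfold Spec_assign_mode_to_the_key; infer_instance

-- ===== CLAIM (what is proved, stated in full; the proofs are below) =====
def Claim_equal_assign_mode_to_the_key : Prop := ∀ (key : String) (mode : Int), Dom_assign_mode_to_the_key key mode → Pre_assign_mode_to_the_key key mode → Spec_assign_mode_to_the_key key mode (assign_mode_to_the_key key mode)

-- ===== LEMMAS AND PROOFS =====

-- the common per-character transformation both sides compute for mode 0 (sans final 'm')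
def repR : List Char → List Char
  | [] => []
  | c :: t => if c = '/' then 'm' :: '/' :: repR t else c :: repR t

-- the pieces key.split("/") produces
def spP : List Char → List (List Char)
  | [] => [[]]
  | c :: t =>
    if c = '/' then [] :: spP t
    else match spP t with
      | h :: r => (c :: h) :: r
      | [] => [[c]]

theorem spP_ne_nil (l : List Char) : spP l ≠ [] := by
  cases l with
  | nil => simp [spP]
  | cons c t =>
    simp only [spP]
    split
    · simp
    · cases h : spP t <;> simp

theorem spP_cons_of_ne (c : Char) (t : List Char) (hc : ¬ c = '/') :
    spP (c :: t) = (c :: (spP t).headI) :: (spP t).tail := by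
  cases h : spP t with
  | nil => exact absurd h (spP_ne_nil t)
  | cons h0 r => simp [spP, if_neg hc, h]

theorem spP_headI_tail (l : List Char) : (spP l).headI :: (spP l).tail = spP l := by
  cases h : spP l with
  | nil => exact absurd h (spP_ne_nil l)
  | cons a r => simp

theorem replace_go_eq (l : List Char) : ∀ (fuel : Nat) (acc : List Char),
    l.length ≤ fuel →
    PySem.Chars.replace.go ['/'] ['m', '/'] fuel l acc = acc.reverse ++ repR l := by
  induction l with
  | nil => intro fuel acc _; cases fuel <;> simp [PySem.Chars.replace.go, repR]
  | cons c t ih =>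
    intro fuel acc hf
    cases fuel with
    | zero => simp at hf
    | succ n =>
      simp only [PySem.Chars.replace.go]
      by_cases hc : c = '/'
      · subst hc
        rw [if_pos (by simp [List.isPrefixOf])]
        show PySem.Chars.replace.go ['/'] ['m', '/'] n t ('/' :: 'm' :: acc) = _
        rw [ih n ('/' :: 'm' :: acc) (by simpa using hf)]
        simp [repR]
      · rw [if_neg (by simp [List.isPrefixOf]; exact fun h => hc h.symm)]
        rw [ih n (c :: acc) (by simpa using hf)]
        simp [repR, hc]

theorem replace_eq (l : List Char) :
    PySem.Chars.replace l ['/'] ['m', '/'] = repR l := by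
  have := replace_go_eq l l.length [] le_rfl
  simpa [PySem.Chars.replace] using this

theorem splitOn_go_eq (l : List Char) : ∀ (fuel : Nat) (cur : List Char) (acc : List (List Char)),
    l.length ≤ fuel →
    PySem.Chars.splitOn.go ['/'] fuel l cur acc =
      acc.reverse ++ (cur.reverse ++ (spP l).headI) :: (spP l).tail := by
  induction l with
  | nil =>
    intro fuel cur acc _
    cases fuel <;> simp [PySem.Chars.splitOn.go, spP]
  | cons c t ih =>
    intro fuel cur acc hf
    cases fuel with
    | zero => simp at hf
    | succ n =>
      simp only [PySem.Chars.splitOn.go]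
      by_cases hc : c = '/'
      · subst hc
        rw [if_pos (by simp [List.isPrefixOf])]
        show PySem.Chars.splitOn.go ['/'] n t [] (cur.reverse :: acc) = _
        rw [ih n [] (cur.reverse :: acc) (by simpa using hf)]
        simp [spP, spP_headI_tail]
      · rw [if_neg (by simp [List.isPrefixOf]; exact fun h => hc h.symm)]
        rw [ih n (c :: cur) acc (by simpa using hf)]
        rw [spP_cons_of_ne c t hc]
        simp

theorem splitOn_eq (l : List Char) :
    PySem.Chars.splitOn l ['/'] = ((spP l).headI) :: (spP l).tail := by
  have := splitOn_go_eq l (l.length + 1) [] [] (by omega)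
  simpa [PySem.Chars.splitOn] using this

theorem join_spP (l : List Char) :
    PySem.Chars.join ['/'] ((spP l).map (fun k => k ++ ['m'])) = repR l ++ ['m'] := by
  induction l with
  | nil => simp [spP, repR, PySem.Chars.join_singleton]
  | cons c t ih =>
    by_cases hc : c = '/'
    · subst hc
      rw [← spP_headI_tail t] at ih
      simp only [List.map_cons] at ih
      have h1 : spP ('/' :: t) = [] :: (spP t).headI :: (spP t).tail := by
        rw [spP_headI_tail]; simp [spP]
      rw [h1]
      simp only [List.map_cons, List.nil_append]
      rw [PySem.Chars.join_cons_cons, ih]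
      simp [repR]
    · rw [spP_cons_of_ne c t hc]
      rw [← spP_headI_tail t] at ih
      simp only [List.map_cons] at ih ⊢
      simp only [repR, if_neg hc]
      cases h : (spP t).tail with
      | nil =>
        rw [h] at ih
        simp only [List.map_nil] at ih ⊢
        rw [PySem.Chars.join_singleton] at ih ⊢
        simp [ih]
      | cons r0 rr =>
        rw [h] at ih
        simp only [List.map_cons] at ih ⊢
        rw [PySem.Chars.join_cons_cons] at ih ⊢
        simp only [List.cons_append, List.append_assoc, List.nil_append] at ih ⊢
        simp [ih]

theorem repR_of_no_slash (l : List Char) (h : '/' ∉ l) : repR l = l := by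
  induction l with
  | nil => simp [repR]
  | cons c t ih =>
    simp only [List.mem_cons, not_or] at h
    simp [repR, Ne.symm h.1, ih h.2]

-- ===== VERDICT (by name: the statement is the Claim_ definition above) =====
theorem assign_mode_to_the_key_spec : Claim_equal_assign_mode_to_the_key := by
  intro key mode _ hpre
  unfold Spec_assign_mode_to_the_key assign_mode_to_the_key assign_mode_to_the_key_alt
  by_cases hm : mode = 0
  · simp only [if_pos hm]
    have hsl : ("/" : String).toList = ['/'] := by decide
    have hml : ("m/" : String).toList = ['m', '/'] := by decide
    have hrep : (PySem.Str.replace key "/" "m/").toList = repR key.toList := by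
      rw [PySem.Str.toList_replace, hsl, hml, replace_eq]
    by_cases hin : PySem.Str.isIn "/" key = true
    · have hin' : PySem.Chars.isIn ['/'] key.toList = true := by
        rw [← hsl]; exact hin
      rw [if_neg (by simp [hin'])]
      have hsplit : (PySem.Str.split? key "/").getD [] =
          ((spP key.toList).headI :: (spP key.toList).tail).map String.ofList := by
        simp only [PySem.Str.split?, PySem.Chars.split?, hsl]
        rw [if_neg (by simp)]
        simp [splitOn_eq]
      rw [hsplit, hrep]
      simp only [PySem.Str.join, List.map_cons, List.map_map]
      congr 1
      have hm1 : ("m" : String).toList = ['m'] := by decide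
      have hJ := join_spP key.toList
      rw [← spP_headI_tail key.toList, List.map_cons] at hJ
      rw [hsl]
      simp only [String.toList_ofList, hm1]
      have hfun : (String.toList ∘ (fun k => String.ofList (k.toList ++ ['m'])) ∘ String.ofList) =
          (fun k : List Char => k ++ ['m']) := by
        funext k; simp
      rw [hfun]
      exact hJ
    · have hin2 : PySem.Chars.isIn ['/'] key.toList = false := by
        rw [← hsl]; exact eq_false_of_ne_true hin
      rw [if_pos (by simp [hin2])]
      have hns : '/' ∉ key.toList := by
        intro hmem
        have hinf : PySem.Chars.isIn ['/'] key.toList = true := by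
          rw [PySem.Chars.isIn_iff_infix]
          obtain ⟨s, t, heq⟩ := List.append_of_mem hmem
          exact ⟨s, t, by rw [heq]; simp⟩
        rw [hinf] at hin2; exact Bool.true_eq_false.mp hin2
      rw [hrep, repR_of_no_slash _ hns]
  · rcases hpre with h0 | h1
    · exact absurd h0 hm
    · simp [hm]
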